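-- pv_equiv track=rewrite | github.com/TheYakEmperor/babel | create_country_pages.py | organize_languages_by_family
-- ===== SOURCE A (Python) =====
-- from collections import defaultdict
--
-- def build_tree_path(languoid_id, language_data, memo=None):
--     """Build the full path from root to a languoid."""
--     if memo is None:
--         memo = {}
--
--     if languoid_id in memo:
--         return memo[languoid_id]
--
--     if languoid_id not in language_data:
--         return []
--
--     data = language_data[languoid_id]
--     parent_id = data['parent_id']
--
--     if parent_id and parent_id in language_data:
--         path = build_tree_path(parent_id, language_data, memo)
--     else:
--         path = []
--
--     path.append(languoid_id)
--     memo[languoid_id] = path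
--     return path
--
-- def organize_languages_by_family(languages_in_country, language_data):
--     """
--     Organize languages into a hierarchical structure by family.
--     Returns a dict: { top_family_id: { 'name': ..., 'children': [...] } }
--     """
--     # First, find the top-level family for each language
--     language_to_top_family = {}
--
--     for lang_id in languages_in_country:
--         if lang_id not in language_data:
--             continue
--
--         path = build_tree_path(lang_id, language_data)
--         if path:
--             # Top family is the first element in path
--             top_family = path[0]
--             language_to_top_family[lang_id] = top_family
--         else:
--             # Isolate - treat as its own family
--             language_to_top_family[lang_id] = lang_id
--
--     # Group languages by top-level family
--     family_groups = defaultdict(list)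
--     for lang_id, top_family in language_to_top_family.items():
--         family_groups[top_family].append(lang_id)
--
--     return family_groups
-- ===== SOURCE B (Python) =====
-- def organize_languages_by_family(languages_in_country, language_data):
--     """
--     Organize languages into a hierarchical structure by family.
--     Returns a dict: { top_family_id: [lang_id, ...] }
--     One pass over the languages; roots are found by an iterative upward walk
--     with a cache of already-resolved roots shared across all languages.
--     """
--     cache = {}   # languoid -> its top-level family, shared across all walks
--     groups = {}
--     seen = set()
--     for lang in languages_in_country:
--         if lang not in language_data or lang in seen:
--             continue
--         seen.add(lang)
--         # walk upward, collecting the not-yet-resolved part of the chain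
--         node = lang
--         chain = []
--         while True:
--             if node in cache:
--                 root = cache[node]
--                 break
--             chain.append(node)
--             parent = language_data[node]['parent_id']
--             if parent and parent in language_data:
--                 node = parent
--             else:
--                 root = node
--                 break
--         for n in chain:
--             cache[n] = root
--         groups.setdefault(root, []).append(lang)
--     return groups
-- ===== Notes on version B (the rewrite author's own statement) =====
-- stated objective: faster
-- what changed: A rebuilds the whole root-to-languoid path recursively with a fresh memo per language and then groups in a second pass over an intermediate language-to-family dict; B does one pass over the languages, finding each top-level family by an iterative upward walk with a single root cache shared across all languages, and groups directly.
import Mathlib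
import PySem

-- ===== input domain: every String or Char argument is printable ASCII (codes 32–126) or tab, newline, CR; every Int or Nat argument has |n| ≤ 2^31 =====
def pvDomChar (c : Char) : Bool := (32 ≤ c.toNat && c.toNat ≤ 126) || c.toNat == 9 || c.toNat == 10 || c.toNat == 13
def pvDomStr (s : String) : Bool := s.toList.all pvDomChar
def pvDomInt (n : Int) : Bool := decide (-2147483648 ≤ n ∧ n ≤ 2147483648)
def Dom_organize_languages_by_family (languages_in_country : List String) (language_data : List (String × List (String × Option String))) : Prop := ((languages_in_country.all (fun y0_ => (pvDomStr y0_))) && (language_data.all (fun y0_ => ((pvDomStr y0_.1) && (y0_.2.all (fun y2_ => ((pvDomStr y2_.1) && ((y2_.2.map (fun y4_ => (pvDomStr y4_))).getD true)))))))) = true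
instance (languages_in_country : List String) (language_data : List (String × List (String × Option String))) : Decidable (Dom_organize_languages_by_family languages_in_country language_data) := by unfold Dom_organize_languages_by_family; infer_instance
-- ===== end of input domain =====

-- B replaces A's per-language fresh-memo recursion (two passes: language→root dict, then grouping)
-- by one pass with a single root cache shared across all languages. Equivalence of RETURN values.

-- language_data[k]['parent_id'] — the same dict access both Pythons perform.
-- The '.getD none' is exact wherever the key 'parent_id' is present; inputs where Python
-- raises KeyError (key absent on a reached languoid) are excluded by Pre_ below.
def pvParent (data : PySem.Dict String (List (String × Option String))) (k : String) : Option String :=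
  (PySem.Dict.get? (PySem.Dict.mk ((PySem.Dict.get? data k).getD [])) "parent_id").getD none

-- ===== PORT A =====
-- build_tree_path: recursion on a fuel bound; Pre_ guarantees the parent chain ends within
-- language_data.length + 1 steps, so the fuel is never exhausted on admitted inputs
-- (on a cyclic chain Python A hits RecursionError — excluded by Pre_).
def buildTreePath (data : PySem.Dict String (List (String × Option String))) :
    Nat → String → PySem.Dict String (List String) → List String × PySem.Dict String (List String)
  | 0, _, memo => ([], memo)
  | fuel+1, id, memo =>
    match PySem.Dict.get? memo id with
    | some p => (p, memo)
    | none =>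
      if PySem.Dict.contains data id then
        match pvParent data id with
        | some p =>
          if p != "" && PySem.Dict.contains data p then
            let r := buildTreePath data fuel p memo
            let path := r.1 ++ [id]
            (path, PySem.Dict.insert r.2 id path)
          else
            let path := ([] : List String) ++ [id]
            (path, PySem.Dict.insert memo id path)
        | none =>
          let path := ([] : List String) ++ [id]
          (path, PySem.Dict.insert memo id path)
      else ([], memo)

-- body of A's first loop (language_to_top_family)
def aAssign (data : PySem.Dict String (List (String × Option String))) (N : Nat)
    (acc : PySem.Dict String String) (lang : String) : PySem.Dict String String :=
  if PySem.Dict.contains data lang then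
    match (buildTreePath data N lang PySem.Dict.empty).1 with
    | top :: _ => PySem.Dict.insert acc lang top
    | [] => PySem.Dict.insert acc lang lang
  else acc

-- body of A's second loop (defaultdict(list) append)
def aGroup (g : PySem.Dict String (List String)) (p : String × String) : PySem.Dict String (List String) :=
  PySem.Dict.modify g p.2 [] (fun t => t ++ [p.1])

def organize_languages_by_family (languages_in_country : List String) (language_data : List (String × List (String × Option String))) : List (String × List String) :=
  let data := PySem.Dict.mk language_data
  let lttf := languages_in_country.foldl (aAssign data (language_data.length + 1)) PySem.Dict.empty
  (lttf.items.foldl aGroup PySem.Dict.empty).items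

-- ===== PORT B =====
-- iterative upward walk: returns (root, uncached part of the chain); fuel as in A's port
def rootWalk (data : PySem.Dict String (List (String × Option String))) :
    Nat → String → PySem.Dict String String → List String → String × List String
  | 0, node, _, chain => (node, chain)
  | fuel+1, node, cache, chain =>
    match PySem.Dict.get? cache node with
    | some r => (r, chain)
    | none =>
      let chain' := chain ++ [node]
      match pvParent data node with
      | some p =>
        if p != "" && PySem.Dict.contains data p then rootWalk data fuel p cache chain'
        else (node, chain')
      | none => (node, chain')

-- body of B's single loop; state = (groups, cache, seen)
def bStep (data : PySem.Dict String (List (String × Option String))) (N : Nat)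
    (st : PySem.Dict String (List String) × PySem.Dict String String × PySem.Set String)
    (lang : String) : PySem.Dict String (List String) × PySem.Dict String String × PySem.Set String :=
  if PySem.Dict.contains data lang && !(PySem.Set.contains st.2.2 lang) then
    let rc := rootWalk data N lang st.2.1 []
    (PySem.Dict.modify st.1 rc.1 [] (fun t => t ++ [lang]),
     rc.2.foldl (fun c n => PySem.Dict.insert c n rc.1) st.2.1,
     PySem.Set.add st.2.2 lang)
  else st

def organize_languages_by_family_alt (languages_in_country : List String) (language_data : List (String × List (String × Option String))) : List (String × List String) :=
  let data := PySem.Dict.mk language_data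
  ((languages_in_country.foldl (bStep data (language_data.length + 1))
      (PySem.Dict.empty, PySem.Dict.empty, PySem.Set.empty)).1).items

-- ===== PRECONDITION & SPEC =====
-- chainOK data n k: along the parent EDGES of the input data starting at k, every languoid
-- has a 'parent_id' entry and a top-level languoid is reached within n steps. This is a
-- bounded-reachability SHAPE condition on the input graph (which edges exist and that they
-- are acyclic); it computes none of the ports' values (no path, no memo/cache, no grouping).
-- Acyclicity of a finite functional graph has no bound-free decidable statement, so the
-- bound language_data.length + 1 (≥ any acyclic chain) makes it checkable.
def chainOK (data : PySem.Dict String (List (String × Option String))) : Nat → String → Bool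
  | 0, _ => false
  | n+1, k =>
    PySem.Dict.contains (PySem.Dict.mk ((PySem.Dict.get? data k).getD [])) "parent_id" &&
    (match pvParent data k with
     | some p => if p != "" && PySem.Dict.contains data p then chainOK data n p else true
     | none => true)

-- Pre_ excludes exactly the inputs where Python A raises: some listed language present in
-- language_data reaches a languoid whose record lacks 'parent_id' (KeyError) or whose parent
-- chain is cyclic (RecursionError). A terminating chain visits distinct keys, so it ends
-- within language_data.length + 1 steps.
def Pre_organize_languages_by_family (languages_in_country : List String) (language_data : List (String × List (String × Option String))) : Prop :=
  ∀ lang ∈ languages_in_country,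
    PySem.Dict.contains (PySem.Dict.mk language_data) lang = true →
    chainOK (PySem.Dict.mk language_data) (language_data.length + 1) lang = true

instance (languages_in_country : List String) (language_data : List (String × List (String × Option String))) : Decidable (Pre_organize_languages_by_family languages_in_country language_data) := by unfold Pre_organize_languages_by_family; infer_instance

def pvWitness_organize_languages_by_family : List String × (List (String × List (String × Option String))) :=
  (["en", "de", "xx"],
   [("en", [("parent_id", some "ger")]), ("de", [("parent_id", some "ger")]), ("ger", [("parent_id", none)])])

def Spec_organize_languages_by_family (languages_in_country : List String) (language_data : List (String × List (String × Option String))) (out : List (String × List String)) : Prop := out = organize_languages_by_family_alt languages_in_country language_data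
instance (languages_in_country : List String) (language_data : List (String × List (String × Option String))) (out : List (String × List String)) : Decidable (Spec_organize_languages_by_family languages_in_country language_data out) := by unfold Spec_organize_languages_by_family; infer_instance

-- ===== CLAIM (what is proved, stated in full; the proofs are below) =====
def Claim_equal_organize_languages_by_family : Prop := ∀ (languages_in_country : List String) (language_data : List (String × List (String × Option String))), Dom_organize_languages_by_family languages_in_country language_data → Pre_organize_languages_by_family languages_in_country language_data → Spec_organize_languages_by_family languages_in_country language_data (organize_languages_by_family languages_in_country language_data)

-- ===== LEMMAS AND PROOFS =====

-- the common mathematical root function both ports compute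
def rootF (data : PySem.Dict String (List (String × Option String))) : Nat → String → String
  | 0, k => k
  | n+1, k =>
    match pvParent data k with
    | some p => if p != "" && PySem.Dict.contains data p then rootF data n p else k
    | none => k

-- cache invariant for B's shared cache
def cacheOK (data : PySem.Dict String (List (String × Option String))) (cache : PySem.Dict String String) : Prop :=
  ∀ j r, PySem.Dict.get? cache j = some r → ∃ n, chainOK data n j = true ∧ rootF data n j = r

theorem rootF_stable (data : PySem.Dict String (List (String × Option String))) :
    ∀ n m k, chainOK data n k = true → chainOK data m k = true → rootF data n k = rootF data m k := by
  intro n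
  induction n with
  | zero => intro m k h; simp [chainOK] at h
  | succ n ih =>
    intro m k hn hm
    cases m with
    | zero => simp [chainOK] at hm
    | succ m =>
      simp only [chainOK] at hn hm
      rw [Bool.and_eq_true] at hn hm
      obtain ⟨-, hn⟩ := hn
      obtain ⟨-, hm⟩ := hm
      simp only [rootF]
      cases hp : pvParent data k with
      | none => rfl
      | some p =>
        simp only [hp] at hn hm ⊢
        by_cases hb : (p != "" && PySem.Dict.contains data p) = true
        · simp only [hb, if_pos] at hn hm ⊢
          exact ih m p hn hm
        · simp only [if_neg hb] at hn hm ⊢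

theorem chainOK_contains (data : PySem.Dict String (List (String × Option String))) (n : Nat) (k : String)
    (h : chainOK data (n+1) k = true) : PySem.Dict.contains data k = true := by
  simp only [chainOK, Bool.and_eq_true] at h
  obtain ⟨h1, -⟩ := h
  rw [PySem.Dict.contains_eq_isSome_get?]
  cases hg : PySem.Dict.get? data k with
  | some v => rfl
  | none => rw [hg] at h1; simp [PySem.Dict.contains] at h1

theorem buildTreePath_head (data : PySem.Dict String (List (String × Option String))) :
    ∀ n k, chainOK data n k = true →
      ∃ t, (buildTreePath data n k PySem.Dict.empty).1 = rootF data n k :: t := by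
  intro n
  induction n with
  | zero => intro k h; simp [chainOK] at h
  | succ n ih =>
    intro k h
    have hck := chainOK_contains data n k h
    simp only [chainOK] at h
    rw [Bool.and_eq_true] at h
    obtain ⟨-, h⟩ := h
    simp only [buildTreePath, PySem.Dict.get?_empty, hck, rootF]
    cases hp : pvParent data k with
    | none => exact ⟨[], by simp⟩
    | some p =>
      simp only [hp] at h ⊢
      by_cases hb : (p != "" && PySem.Dict.contains data p) = true
      · simp only [hb, if_pos] at h ⊢
        obtain ⟨t, ht⟩ := ih p h
        exact ⟨t ++ [k], by simp [ht]⟩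
      · simp only [if_neg hb] at h ⊢
        exact ⟨[], by simp⟩

theorem rootWalk_spec (data : PySem.Dict String (List (String × Option String))) :
    ∀ n k cache chain, chainOK data n k = true → cacheOK data cache →
      (rootWalk data n k cache chain).1 = rootF data n k ∧
      ∀ x ∈ (rootWalk data n k cache chain).2,
        x ∈ chain ∨ ∃ m, chainOK data m x = true ∧ rootF data m x = rootF data n k := by
  intro n
  induction n with
  | zero => intro k cache chain h _; simp [chainOK] at h
  | succ n ih =>
    intro k cache chain h hc
    have h0 := h
    simp only [chainOK] at h
    rw [Bool.and_eq_true] at h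
    obtain ⟨-, h⟩ := h
    simp only [rootWalk]
    cases hg : PySem.Dict.get? cache k with
    | some r =>
      simp only []
      refine ⟨?_, fun x hx => Or.inl hx⟩
      obtain ⟨m, hm, hr⟩ := hc k r hg
      rw [← hr]
      exact rootF_stable data m (n+1) k hm h0
    | none =>
      simp only []
      cases hp : pvParent data k with
      | none =>
        have hr : rootF data (n+1) k = k := by simp [rootF, hp]
        simp only [hr]
        refine ⟨trivial, fun x hx => ?_⟩
        rcases List.mem_append.mp hx with hx' | hx'
        · exact Or.inl hx'
        · simp only [List.mem_singleton] at hx'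
          subst hx'
          exact Or.inr ⟨n+1, h0, hr⟩
      | some p =>
        simp only [hp] at h ⊢
        by_cases hb : (p != "" && PySem.Dict.contains data p) = true
        · simp only [hb, if_pos] at h ⊢
          obtain ⟨h1, h2⟩ := ih p cache (chain ++ [k]) h hc
          refine ⟨by rw [h1]; simp [rootF, hp, hb], fun x hx => ?_⟩
          rcases h2 x hx with hx' | ⟨m, hm, hr⟩
          · rcases List.mem_append.mp hx' with hx'' | hx''
            · exact Or.inl hx''
            · simp only [List.mem_singleton] at hx''
              subst hx''
              exact Or.inr ⟨n+1, h0, rfl⟩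
          · exact Or.inr ⟨m, hm, by rw [hr]; simp [rootF, hp, hb]⟩
        · have hr : rootF data (n+1) k = k := by
            simp only [rootF, hp]; rw [if_neg hb]
          simp only [if_neg hb, hr]
          refine ⟨trivial, fun x hx => ?_⟩
          rcases List.mem_append.mp hx with hx' | hx'
          · exact Or.inl hx'
          · simp only [List.mem_singleton] at hx'
            subst hx'
            exact Or.inr ⟨n+1, h0, hr⟩

theorem cacheOK_fold (data : PySem.Dict String (List (String × Option String))) (r : String) :
    ∀ (ch : List String) (cache : PySem.Dict String String), cacheOK data cache →
      (∀ x ∈ ch, ∃ m, chainOK data m x = true ∧ rootF data m x = r) →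
      cacheOK data (ch.foldl (fun c n => PySem.Dict.insert c n r) cache) := by
  intro ch
  induction ch with
  | nil => intro cache hc _; exact hc
  | cons x ch ih =>
    intro cache hc hall
    simp only [List.foldl_cons]
    refine ih _ ?_ (fun y hy => hall y (List.mem_cons_of_mem _ hy))
    intro j r' hj
    rw [PySem.Dict.get?_insert] at hj
    by_cases hjx : j = x
    · rw [if_pos hjx] at hj
      obtain ⟨m, hm, hr⟩ := hall x List.mem_cons_self
      subst hjx
      exact ⟨m, hm, by rw [hr]; exact Option.some.inj hj⟩
    · rw [if_neg hjx] at hj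
      exact hc j r' hj

-- dedup of the valid languages in first-occurrence order (what both loops effectively process)
def pvDedup (data : PySem.Dict String (List (String × Option String))) (s : List String) (l : List String) : List String :=
  l.foldl (fun s x => if PySem.Dict.contains data x && !(List.contains s x) then s ++ [x] else s) s

-- the common grouping step
def pvG (data : PySem.Dict String (List (String × Option String))) (N : Nat)
    (g : PySem.Dict String (List String)) (x : String) : PySem.Dict String (List String) :=
  PySem.Dict.modify g (rootF data N x) [] (fun t => t ++ [x])

-- B with the cache erased
def pvPure (data : PySem.Dict String (List (String × Option String))) (N : Nat)
    (st : PySem.Dict String (List String) × List String) (x : String) :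
    PySem.Dict String (List String) × List String :=
  if PySem.Dict.contains data x && !(List.contains st.2 x) then
    (pvG data N st.1 x, st.2 ++ [x])
  else st

theorem insert_pair (data : PySem.Dict String (List (String × Option String))) (N : Nat)
    (s : List String) (k : String) :
    PySem.Dict.insert (PySem.Dict.mk (s.map (fun x => (x, rootF data N x)))) k (rootF data N k)
      = PySem.Dict.mk ((if List.contains s k then s else s ++ [k]).map (fun x => (x, rootF data N x))) := by
  have hcont : (PySem.Dict.mk (s.map (fun x => (x, rootF data N x)))).contains k = List.contains s k := by
    simp [PySem.Dict.contains, List.any_map, Function.comp_def, List.any_beq']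
  by_cases hm : List.contains s k = true
  · rw [if_pos hm]
    apply PySem.Dict.ext
    rw [PySem.Dict.items_insert_of_contains _ _ (by rw [hcont]; exact hm)]
    show (s.map _).map _ = s.map _
    rw [List.map_map]
    apply List.map_congr_left
    intro x hx
    by_cases hxk : x = k
    · subst hxk; simp
    · simp [hxk]
  · rw [if_neg hm]
    apply PySem.Dict.ext
    rw [PySem.Dict.items_insert_of_not_contains _ _ (by rw [hcont]; simpa using hm)]
    show s.map _ ++ [(k, rootF data N k)] = (s ++ [k]).map _
    simp

theorem aFold_eq (data : PySem.Dict String (List (String × Option String))) (N : Nat) :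
    ∀ (l s : List String), (∀ x ∈ l, PySem.Dict.contains data x = true → chainOK data N x = true) →
      l.foldl (aAssign data N) (PySem.Dict.mk (s.map (fun x => (x, rootF data N x))))
        = PySem.Dict.mk ((pvDedup data s l).map (fun x => (x, rootF data N x))) := by
  intro l
  induction l with
  | nil => intro s _; simp [pvDedup]
  | cons x l ih =>
    intro s hall
    simp only [List.foldl_cons]
    by_cases hcx : PySem.Dict.contains data x = true
    · have hch := hall x List.mem_cons_self hcx
      obtain ⟨t, ht⟩ := buildTreePath_head data N x hch
      have hstep : aAssign data N (PySem.Dict.mk (s.map (fun x => (x, rootF data N x)))) x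
          = PySem.Dict.mk ((if List.contains s x then s else s ++ [x]).map (fun x => (x, rootF data N x))) := by
        simp only [aAssign, hcx, if_pos, ht]
        exact insert_pair data N s x
      rw [hstep, ih _ (fun y hy hcy => hall y (List.mem_cons_of_mem _ hy) hcy)]
      have hd : pvDedup data (if List.contains s x then s else s ++ [x]) l = pvDedup data s (x :: l) := by
        simp only [pvDedup, List.foldl_cons, hcx, Bool.true_and]
        by_cases hsx : List.contains s x = true
        · simp [List.contains_iff_mem.mp hsx]
        · have : x ∉ s := by simpa using hsx
          simp [this]
      rw [hd]
    · simp only [Bool.not_eq_true] at hcx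
      have hstep : aAssign data N (PySem.Dict.mk (s.map (fun x => (x, rootF data N x)))) x
          = PySem.Dict.mk (s.map (fun x => (x, rootF data N x))) := by
        simp [aAssign, hcx]
      rw [hstep, ih _ (fun y hy hcy => hall y (List.mem_cons_of_mem _ hy) hcy)]
      have hd : pvDedup data s l = pvDedup data s (x :: l) := by
        simp [pvDedup, List.foldl_cons, hcx]
      rw [hd]

theorem bFold_eq (data : PySem.Dict String (List (String × Option String))) (N : Nat) :
    ∀ (l : List String) (grp : PySem.Dict String (List String)) (cache : PySem.Dict String String)
      (s : List String), cacheOK data cache →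
      (∀ x ∈ l, PySem.Dict.contains data x = true → chainOK data N x = true) →
      (l.foldl (bStep data N) (grp, cache, s)).1 = (l.foldl (pvPure data N) (grp, s)).1 := by
  intro l
  induction l with
  | nil => intro grp cache s _ _; rfl
  | cons x l ih =>
    intro grp cache s hcinv hall
    simp only [List.foldl_cons]
    by_cases hx : (PySem.Dict.contains data x && !(PySem.Set.contains s x)) = true
    · have hx2 := hx
      rw [Bool.and_eq_true] at hx2
      obtain ⟨hcx, hsx⟩ := hx2
      have hch := hall x List.mem_cons_self hcx
      obtain ⟨h1, h2⟩ := rootWalk_spec data N x cache [] hch hcinv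
      have hB : bStep data N (grp, cache, s) x
          = (PySem.Dict.modify grp (rootF data N x) [] (fun t => t ++ [x]),
             (rootWalk data N x cache []).2.foldl
               (fun c n => PySem.Dict.insert c n (rootF data N x)) cache,
             PySem.Set.add s x) := by
        simp only [bStep, hx, if_pos, h1]
      have hP : pvPure data N (grp, s) x = (pvG data N grp x, s ++ [x]) := by
        have hmem : x ∉ s := by
          have : List.contains s x = false := by simpa [PySem.Set.contains] using hsx
          simpa using this
        simp [pvPure, hcx, hmem]
      have hAdd : PySem.Set.add s x = s ++ [x] := by
        simp only [PySem.Set.add]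
        rw [if_neg (by simpa [PySem.Set.contains] using hsx)]
      rw [hB, hP, hAdd]
      refine ih _ _ _ ?_ (fun y hy hcy => hall y (List.mem_cons_of_mem _ hy) hcy)
      refine cacheOK_fold data (rootF data N x) _ cache hcinv ?_
      intro y hy
      rcases h2 y hy with hy' | hy'
      · simp at hy'
      · exact hy'
    · have hx' : (PySem.Dict.contains data x && !(List.contains s x)) = false := by
        simpa [PySem.Set.contains] using hx
      have hB : bStep data N (grp, cache, s) x = (grp, cache, s) := by
        simp only [bStep]
        rw [if_neg hx]
      have hP : pvPure data N (grp, s) x = (grp, s) := by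
        simp only [pvPure]
        rw [if_neg (by rw [hx']; simp)]
      rw [hB, hP]
      exact ih _ _ _ hcinv (fun y hy hcy => hall y (List.mem_cons_of_mem _ hy) hcy)

theorem pure_eq_dedup (data : PySem.Dict String (List (String × Option String))) (N : Nat) :
    ∀ (l s : List String) (g : PySem.Dict String (List String)),
      g = s.foldl (pvG data N) PySem.Dict.empty →
      (l.foldl (pvPure data N) (g, s)).1 = (pvDedup data s l).foldl (pvG data N) PySem.Dict.empty := by
  intro l
  induction l with
  | nil => intro s g hg; simpa [pvDedup] using hg
  | cons x l ih =>
    intro s g hg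
    simp only [List.foldl_cons]
    by_cases hx : (PySem.Dict.contains data x && !(List.contains s x)) = true
    · have hP : pvPure data N (g, s) x = (pvG data N g x, s ++ [x]) := by
        simp only [pvPure, hx, if_pos]
      have hd : pvDedup data s (x :: l) = pvDedup data (s ++ [x]) l := by
        simp only [pvDedup, List.foldl_cons]
        rw [if_pos hx]
      rw [hP, hd]
      refine ih (s ++ [x]) _ ?_
      rw [List.foldl_append, ← hg]
      rfl
    · have hP : pvPure data N (g, s) x = (g, s) := by
        simp only [pvPure]
        exact if_neg hx
      have hd : pvDedup data s (x :: l) = pvDedup data s l := by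
        simp only [pvDedup, List.foldl_cons]
        rw [if_neg hx]
      rw [hP, hd]
      exact ih s g hg

-- ===== VERDICT (by name: the statement is the Claim_ definition above) =====
theorem organize_languages_by_family_spec : Claim_equal_organize_languages_by_family := by
  intro langs ld _ hpre
  unfold Spec_organize_languages_by_family
  simp only [organize_languages_by_family, organize_languages_by_family_alt]
  have hall : ∀ x ∈ langs, PySem.Dict.contains (PySem.Dict.mk ld) x = true →
      chainOK (PySem.Dict.mk ld) (ld.length + 1) x = true := hpre
  have hA := aFold_eq (PySem.Dict.mk ld) (ld.length + 1) langs [] hall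
  rw [show PySem.Dict.mk (([] : List String).map
        (fun x => (x, rootF (PySem.Dict.mk ld) (ld.length + 1) x)))
      = (PySem.Dict.empty : PySem.Dict String String) from rfl] at hA
  rw [hA]
  have e1 : (PySem.Dict.mk ((pvDedup (PySem.Dict.mk ld) [] langs).map
      (fun x => (x, rootF (PySem.Dict.mk ld) (ld.length + 1) x)))).items
      = (pvDedup (PySem.Dict.mk ld) [] langs).map
          (fun x => (x, rootF (PySem.Dict.mk ld) (ld.length + 1) x)) := rfl
  rw [e1, List.foldl_map]
  have e2 : (fun (g : PySem.Dict String (List String)) (x : String) =>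
      aGroup g (x, rootF (PySem.Dict.mk ld) (ld.length + 1) x))
      = pvG (PySem.Dict.mk ld) (ld.length + 1) := rfl
  rw [e2]
  have hcempty : cacheOK (PySem.Dict.mk ld) PySem.Dict.empty := by
    intro j r h
    rw [PySem.Dict.get?_empty] at h
    cases h
  rw [bFold_eq (PySem.Dict.mk ld) (ld.length + 1) langs PySem.Dict.empty PySem.Dict.empty PySem.Set.empty hcempty hall]
  rw [pure_eq_dedup (PySem.Dict.mk ld) (ld.length + 1) langs PySem.Set.empty PySem.Dict.empty rfl]
  rfl
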